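-- pv_equiv track=rewrite | github.com/GuilhermeGabriel/GuilhermeGabriel-PythonStudies | python_loops_exercicies/lista2-lacoselistas.py | quadrados_magicos
-- ===== SOURCE A (Python) =====
-- def quadrados_magicos(n):
--     l = [1, 2, 3, 4, 5, 6, 7, 8, 9]  # gera_lista(n)
--     q = permutations(l)
--     r = []
--     for quad in q:
--         if is_list_magic(quad):
--             r.append(quad)
--     return r
--
-- def permutations(l):
--     if not l:
--         return [[]]
--     res = []
--     for e in l:
--         temp = l[:]
--         temp.remove(e)
--         res.extend([[e] + r for r in permutations(temp)])
--     return res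
--
-- def is_list_magic(l):
--     l1 = l[0] + l[1] + l[2]
--     l2 = l[3] + l[4] + l[5]
--     l3 = l[6] + l[7] + l[8]
--
--     c1 = l[0] + l[3] + l[6]
--     c2 = l[1] + l[4] + l[7]
--     c3 = l[2] + l[5] + l[8]
--
--     d1 = l[0] + l[4] + l[8]
--     d2 = l[2] + l[4] + l[6]
--
--     return l1 == l2 == l3 == c1 == c2 == c3 == d1 == d2
-- ===== SOURCE B (Python) =====
-- def quadrados_magicos(n):
--     base = [2, 7, 6, 9, 5, 1, 4, 3, 8]
--
--     def rot(s):  # rotate the 3x3 grid 90 degrees clockwise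
--         return [s[6], s[3], s[0], s[7], s[4], s[1], s[8], s[5], s[2]]
--
--     def flip(s):  # mirror the 3x3 grid left-right
--         return [s[2], s[1], s[0], s[5], s[4], s[3], s[8], s[7], s[6]]
--
--     squares = []
--     s = base
--     for _ in range(4):
--         squares.append(s)
--         squares.append(flip(s))
--         s = rot(s)
--     return sorted(squares)
-- ===== Notes on version B (the rewrite author's own statement) =====
-- stated objective: faster
-- what changed: A filters all 362880 permutations of 1..9 by the magic-square test; B generates the 8 magic squares as the dihedral symmetries (rotations and reflections) of one base square and sorts them lexicographically.
import Mathlib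
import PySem

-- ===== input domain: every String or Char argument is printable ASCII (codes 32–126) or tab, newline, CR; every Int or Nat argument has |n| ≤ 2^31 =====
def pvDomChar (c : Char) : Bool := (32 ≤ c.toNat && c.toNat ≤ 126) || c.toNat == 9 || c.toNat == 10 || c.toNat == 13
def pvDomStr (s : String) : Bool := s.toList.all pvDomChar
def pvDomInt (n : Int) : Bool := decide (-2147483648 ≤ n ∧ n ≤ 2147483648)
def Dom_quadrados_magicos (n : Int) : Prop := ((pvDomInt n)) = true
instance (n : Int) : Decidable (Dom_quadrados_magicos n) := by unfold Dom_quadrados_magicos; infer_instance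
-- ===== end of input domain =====

-- B replaces the brute-force scan of all 9! permutations by generating the 8 symmetries
-- of one magic square and sorting them lexicographically (objective: faster).


-- ===== PORT A =====
-- permutations(l): for each e in l, prepend e to every permutation of l with e removed.
-- fuel bounds the recursion depth (the list shrinks by one each level); with fuel ≥ l.length it is exact.
def permutationsA (fuel : Nat) (l : List Int) : List (List Int) :=
  match fuel with
  | 0 => [[]]
  | fuel + 1 =>
    if l.isEmpty then [[]]
    else
      l.foldl
        (fun res e => res ++ (permutationsA fuel (l.erase e)).map (fun r => e :: r))
        []

-- is_list_magic: A indexes l[0]..l[8] and only ever calls it on length-9 lists, where pyGetD is exact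
def isListMagicA (l : List Int) : Bool :=
  let g := fun (i : Int) => PySem.List.pyGetD l i 0
  let l1 := g 0 + g 1 + g 2
  let l2 := g 3 + g 4 + g 5
  let l3 := g 6 + g 7 + g 8
  let c1 := g 0 + g 3 + g 6
  let c2 := g 1 + g 4 + g 7
  let c3 := g 2 + g 5 + g 8
  let d1 := g 0 + g 4 + g 8
  let d2 := g 2 + g 4 + g 6
  l1 == l2 && l2 == l3 && l3 == c1 && c1 == c2 && c2 == c3 && c3 == d1 && d1 == d2

def quadrados_magicos (_n : Int) : List (List Int) :=
  let l : List Int := [1, 2, 3, 4, 5, 6, 7, 8, 9]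
  let q := permutationsA 9 l
  q.foldl (fun r quad => if isListMagicA quad then r ++ [quad] else r) []

-- ===== PORT B =====
def rotB (s : List Int) : List Int :=
  let g := fun (i : Int) => PySem.List.pyGetD s i 0
  [g 6, g 3, g 0, g 7, g 4, g 1, g 8, g 5, g 2]

def flipB (s : List Int) : List Int :=
  let g := fun (i : Int) => PySem.List.pyGetD s i 0
  [g 2, g 1, g 0, g 5, g 4, g 3, g 8, g 7, g 6]

def quadrados_magicos_alt (_n : Int) : List (List Int) :=
  let base : List Int := [2, 7, 6, 9, 5, 1, 4, 3, 8]
  let step := fun (st : List (List Int) × List Int) (_ : Int) =>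
    (st.1 ++ [st.2, flipB st.2], rotB st.2)
  let squares := ((PySem.List.pyRange 0 4 1).foldl step ([], base)).1
  PySem.List.sorted squares (fun x => x) false

-- ===== PRECONDITION & SPEC =====
def Spec_quadrados_magicos (n : Int) (out : List (List Int)) : Prop := out = quadrados_magicos_alt n
instance (n : Int) (out : List (List Int)) : Decidable (Spec_quadrados_magicos n out) := by unfold Spec_quadrados_magicos; infer_instance

-- ===== CLAIM (what is proved, stated in full; the proofs are below) =====
def Claim_equal_quadrados_magicos : Prop := ∀ (n : Int), Dom_quadrados_magicos n → Spec_quadrados_magicos n (quadrados_magicos n)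

-- ===== LEMMAS AND PROOFS =====

-- The 8 magic squares, in the order both programs return them.
def magic8 : List (List Int) :=
  [[2, 7, 6, 9, 5, 1, 4, 3, 8], [2, 9, 4, 7, 5, 3, 6, 1, 8],
   [4, 3, 8, 9, 5, 1, 2, 7, 6], [4, 9, 2, 3, 5, 7, 8, 1, 6],
   [6, 1, 8, 7, 5, 3, 2, 9, 4], [6, 7, 2, 1, 5, 9, 8, 3, 4],
   [8, 1, 6, 3, 5, 7, 4, 9, 2], [8, 3, 4, 1, 5, 9, 6, 7, 2]]

-- Prefix test that is true only when NO completion (by a permutation of the unused digits,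
-- so the nine cells always sum to 45) can be magic: row 1, the center cell, row 2,
-- column 1 and the anti-diagonal are each forced once the corresponding cells are fixed.
def pruneB : List Int → Bool
  | [a, b, c] => !(a + b + c == 15)
  | [_, _, _, _, e] => !(e == 5)
  | [_, _, _, d, e, f] => !(d + e + f == 15)
  | [a, _, c, d, e, _, g] => !(a + d + g == 15) || !(c + e + g == 15)
  | _ => false

-- A's magic filter pushed into A's permutation tree, with the pruning above.
def pruned (pre : List Int) (fuel : Nat) (l : List Int) : List (List Int) :=
  match fuel with
  | 0 => if isListMagicA pre then [[]] else []
  | fuel + 1 =>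
    if l.isEmpty then (if isListMagicA pre then [[]] else [])
    else if pruneB pre then []
    else l.flatMap (fun e => (pruned (pre ++ [e]) fuel (l.erase e)).map (fun r => e :: r))

lemma prune3_sound (a b c : Int) (r : List Int) (hlen : r.length = 6)
    (hsum : a + b + c + r.sum = 45) (h : ¬(a + b + c = 15)) :
    isListMagicA ([a, b, c] ++ r) = false := by
  rcases r with _ | ⟨v3, _ | ⟨v4, _ | ⟨v5, _ | ⟨v6, _ | ⟨v7, _ | ⟨v8, _ | ⟨v9, t⟩⟩⟩⟩⟩⟩⟩ <;>
    simp only [List.length_cons, List.length_nil] at hlen <;> try omega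
  simp only [List.sum_cons, List.sum_nil] at hsum
  simp [isListMagicA, pysem]
  omega

lemma prune5_sound (a b c d e : Int) (r : List Int) (hlen : r.length = 4)
    (hsum : a + b + c + d + e + r.sum = 45) (h : ¬(e = 5)) :
    isListMagicA ([a, b, c, d, e] ++ r) = false := by
  rcases r with _ | ⟨v5, _ | ⟨v6, _ | ⟨v7, _ | ⟨v8, _ | ⟨v9, t⟩⟩⟩⟩⟩ <;>
    simp only [List.length_cons, List.length_nil] at hlen <;> try omega
  simp only [List.sum_cons, List.sum_nil] at hsum
  simp [isListMagicA, pysem]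
  omega

lemma prune6_sound (a b c d e f : Int) (r : List Int) (hlen : r.length = 3)
    (hsum : a + b + c + d + e + f + r.sum = 45) (h : ¬(d + e + f = 15)) :
    isListMagicA ([a, b, c, d, e, f] ++ r) = false := by
  rcases r with _ | ⟨v6, _ | ⟨v7, _ | ⟨v8, _ | ⟨v9, t⟩⟩⟩⟩ <;>
    simp only [List.length_cons, List.length_nil] at hlen <;> try omega
  simp only [List.sum_cons, List.sum_nil] at hsum
  simp [isListMagicA, pysem]
  omega

lemma prune7_sound (a b c d e f g : Int) (r : List Int) (hlen : r.length = 2)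
    (hsum : a + b + c + d + e + f + g + r.sum = 45)
    (h : ¬(a + d + g = 15) ∨ ¬(c + e + g = 15)) :
    isListMagicA ([a, b, c, d, e, f, g] ++ r) = false := by
  rcases r with _ | ⟨v7, _ | ⟨v8, _ | ⟨v9, t⟩⟩⟩ <;>
    simp only [List.length_cons, List.length_nil] at hlen <;> try omega
  simp only [List.sum_cons, List.sum_nil] at hsum
  simp [isListMagicA, pysem]
  omega

lemma prune_sound (pre r : List Int) (hlen : pre.length + r.length = 9)
    (hsum : pre.sum + r.sum = 45) (h : pruneB pre = true) :
    isListMagicA (pre ++ r) = false := by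
  unfold pruneB at h
  split at h
  · next a b c =>
    simp only [List.length_cons, List.length_nil] at hlen
    simp only [List.sum_cons, List.sum_nil] at hsum
    apply prune3_sound a b c r (by omega) (by omega)
    simpa using h
  · next a b c d e =>
    simp only [List.length_cons, List.length_nil] at hlen
    simp only [List.sum_cons, List.sum_nil] at hsum
    apply prune5_sound a b c d e r (by omega) (by omega)
    simpa using h
  · next a b c d e f =>
    simp only [List.length_cons, List.length_nil] at hlen
    simp only [List.sum_cons, List.sum_nil] at hsum
    apply prune6_sound a b c d e f r (by omega) (by omega)
    simpa using h
  · next a b c d e f g =>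
    simp only [List.length_cons, List.length_nil] at hlen
    simp only [List.sum_cons, List.sum_nil] at hsum
    apply prune7_sound a b c d e f g r (by omega) (by omega)
    simpa using h
  · simp at h

lemma mem_perms_perm (fuel : Nat) : ∀ (l a : List Int), fuel = l.length →
    a ∈ permutationsA fuel l → a.Perm l := by
  induction fuel with
  | zero =>
    intro l a hf ha
    have : l = [] := List.length_eq_zero_iff.mp hf.symm
    subst this
    simp [permutationsA] at ha
    simp [ha]
  | succ fuel ih =>
    intro l a hf ha
    have hne : l.isEmpty = false := by
      cases l with
      | nil => simp at hf
      | cons x xs => rfl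
    rw [permutationsA] at ha
    simp only [hne, Bool.false_eq_true, if_false] at ha
    rw [PySem.List.foldl_append_eq_flatMap, List.nil_append] at ha
    obtain ⟨e, he, ha⟩ := List.mem_flatMap.mp ha
    obtain ⟨r, hr, rfl⟩ := List.mem_map.mp ha
    have hlen : fuel = (l.erase e).length := by
      rw [List.length_erase_of_mem he]
      omega
    have hperm := ih (l.erase e) r hlen hr
    exact ((hperm.cons e).trans (List.perm_cons_erase he).symm)

lemma filter_perms (fuel : Nat) : ∀ (l pre : List Int), fuel = l.length →
    pre.length + l.length = 9 → pre.sum + l.sum = 45 →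
    (permutationsA fuel l).filter (fun r => isListMagicA (pre ++ r)) = pruned pre fuel l := by
  induction fuel with
  | zero =>
    intro l pre _ _ _
    simp only [permutationsA, pruned, List.filter]
    cases hm : isListMagicA pre <;> simp [hm]
  | succ fuel ih =>
    intro l pre hf hl hs
    have hne : l.isEmpty = false := by
      cases l with
      | nil => simp at hf
      | cons x xs => rfl
    by_cases hp : pruneB pre
    · rw [List.filter_eq_nil_iff.mpr ?_]
      · simp [pruned, hne, hp]
      · intro a ha
        have hperm := mem_perms_perm (fuel + 1) l a hf ha
        simp [prune_sound pre a
          (by rw [hperm.length_eq]; omega)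
          (by rw [hperm.sum_eq]; omega) hp]
    · rw [permutationsA, pruned]
      simp only [hne, Bool.false_eq_true, if_false, hp]
      rw [PySem.List.foldl_append_eq_flatMap, List.nil_append, List.filter_flatMap]
      apply List.flatMap_congr
      intro e he
      rw [List.filter_map]
      have hfe : ((fun r => isListMagicA (pre ++ r)) ∘ fun (r : List Int) => e :: r)
          = fun r => isListMagicA ((pre ++ [e]) ++ r) := by
        funext r
        simp only [Function.comp_apply]
        rw [List.append_cons]
      have heq : fuel = (l.erase e).length := by
        rw [List.length_erase_of_mem he]; omega
      have hsum' : (l.erase e).sum = l.sum - e := by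
        have := (List.perm_cons_erase he).sum_eq
        simp at this
        omega
      rw [hfe, ih (l.erase e) (pre ++ [e]) heq
        (by rw [List.length_append, ← heq]; simp; omega)
        (by rw [List.sum_append, hsum']; simp; omega)]

lemma A_eval (n : Int) : quadrados_magicos n = pruned [] 9 [1, 2, 3, 4, 5, 6, 7, 8, 9] := by
  show (permutationsA 9 [1, 2, 3, 4, 5, 6, 7, 8, 9]).foldl
      (fun r quad => if isListMagicA quad then r ++ [quad] else r) [] = _
  rw [PySem.List.foldl_append_if_eq_filter, List.nil_append]
  rw [show (isListMagicA : List Int → Bool)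
      = fun r => isListMagicA ([] ++ r) by funext r; rw [List.nil_append]]
  exact filter_perms 9 [1, 2, 3, 4, 5, 6, 7, 8, 9] [] (by decide) (by decide) (by decide)

set_option maxRecDepth 20000 in
lemma pruned_eval : pruned [] 9 [1, 2, 3, 4, 5, 6, 7, 8, 9] = magic8 := by decide

lemma B_eval (n : Int) : quadrados_magicos_alt n = magic8 := by
  show quadrados_magicos_alt 0 = magic8
  decide

-- ===== VERDICT (by name: the statement is the Claim_ definition above) =====
theorem quadrados_magicos_spec : Claim_equal_quadrados_magicos := by
  intro n _
  show quadrados_magicos n = quadrados_magicos_alt n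
  rw [A_eval n, pruned_eval, B_eval n]
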